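-- pv_equiv track=rewrite | github.com/RaysonSu/adventofcode2015 | Day 15/main.py | next_list
-- ===== SOURCE A (Python) =====
-- def valid(amounts: list[int], maxmium: int = 100):
--     return sum(amounts) <= maxmium
--
-- def next_list(amounts: list[int], maxmium: int = 100):
--     for i in range(len(amounts) - 1, -1, -1):
--         attempt: list[int] = amounts.copy()
--         attempt[i] += 1
--
--         for j in range(len(amounts) - 1, i, -1):
--             attempt[j] = 0
--
--         if valid(attempt, maxmium):
--             return attempt
--
--     return amounts
-- ===== SOURCE B (Python) =====
-- def next_list(amounts: list[int], maxmium: int = 100):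
--     # one forward pass: remember the last index whose prefix sum leaves room for +1
--     best = -1
--     total = 0
--     for i, x in enumerate(amounts):
--         total += x
--         if total < maxmium:
--             best = i
--     if best == -1:
--         return amounts
--     return amounts[:best] + [amounts[best] + 1] + [0] * (len(amounts) - best - 1)
-- ===== Notes on version B (the rewrite author's own statement) =====
-- stated objective: alternative
-- what changed: A tries each index from the right, each time copying the list, zeroing the tail and re-summing; B makes one forward pass keeping a running prefix sum to remember the last index with room, then builds the result list once.
import Mathlib
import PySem

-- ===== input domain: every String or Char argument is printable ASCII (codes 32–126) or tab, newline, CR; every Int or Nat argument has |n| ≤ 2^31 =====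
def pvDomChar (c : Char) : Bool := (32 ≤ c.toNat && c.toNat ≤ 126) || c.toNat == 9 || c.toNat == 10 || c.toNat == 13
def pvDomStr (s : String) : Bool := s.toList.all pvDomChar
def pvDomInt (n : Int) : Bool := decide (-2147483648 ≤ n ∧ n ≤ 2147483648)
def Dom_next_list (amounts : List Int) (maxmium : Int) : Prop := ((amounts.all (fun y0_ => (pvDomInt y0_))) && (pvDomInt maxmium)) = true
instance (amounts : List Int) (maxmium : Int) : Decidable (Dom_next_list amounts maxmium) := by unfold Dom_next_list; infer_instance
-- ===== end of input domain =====

-- B replaces A's per-index copy/zero/re-sum scan by one forward pass tracking a running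
-- prefix sum and the last index with room, then builds the result once (objective:
-- alternative; equivalence is about the return value — in the no-match branch both
-- return `amounts` itself).

-- ===== PORT A =====
def valid (amounts : List Int) (maxmium : Int) : Bool := decide (amounts.sum ≤ maxmium)

def nextListGo (amounts : List Int) (maxmium : Int) : List Int → List Int
  | [] => amounts
  | i :: rest =>
    let attempt := PySem.List.pySetD amounts i (PySem.List.pyGetD amounts i 0 + 1)
    let attempt2 := (PySem.List.pyRange ((amounts.length : Int) - 1) i (-1)).foldl
        (fun acc j => PySem.List.pySetD acc j 0) attempt
    if valid attempt2 maxmium then attempt2 else nextListGo amounts maxmium rest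

def next_list (amounts : List Int) (maxmium : Int) : List Int :=
  nextListGo amounts maxmium (PySem.List.pyRange ((amounts.length : Int) - 1) (-1) (-1))

-- ===== PORT B =====
-- the for-loop of Source B: state (i, best, total); returns the final best
def altBest (maxmium : Int) : List Int → Int → Int → Int → Int
  | [], _i, best, _total => best
  | x :: xs, i, best, total =>
    let total' := total + x
    altBest maxmium xs (i + 1) (if total' < maxmium then i else best) total'

def next_list_alt (amounts : List Int) (maxmium : Int) : List Int :=
  let best := altBest maxmium amounts 0 (-1) 0
  if best = -1 then amounts
  else PySem.List.slice amounts none (some best) ++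
       [PySem.List.pyGetD amounts best 0 + 1] ++
       List.replicate (((amounts.length : Int) - best - 1).toNat) 0

-- ===== PRECONDITION & SPEC =====
def Spec_next_list (amounts : List Int) (maxmium : Int) (out : List Int) : Prop := out = next_list_alt amounts maxmium
instance (amounts : List Int) (maxmium : Int) (out : List Int) : Decidable (Spec_next_list amounts maxmium out) := by unfold Spec_next_list; infer_instance

-- ===== CLAIM (what is proved, stated in full; the proofs are below) =====
def Claim_equal_next_list : Prop := ∀ (amounts : List Int) (maxmium : Int), Dom_next_list amounts maxmium → Spec_next_list amounts maxmium (next_list amounts maxmium)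

-- ===== LEMMAS AND PROOFS =====

/-- The value both programs return when index `k` is the chosen one. -/
def build (amounts : List Int) (k : Nat) : List Int :=
  amounts.take k ++ [amounts.getD k 0 + 1] ++ List.replicate (amounts.length - k - 1) 0

/-- Greatest `k < m` whose prefix sum leaves room for `+1`. -/
def gbf (amounts : List Int) (maxmium : Int) : Nat → Option Nat
  | 0 => none
  | k+1 => if (amounts.take (k+1)).sum + 1 ≤ maxmium then some k else gbf amounts maxmium k

def encode : Option Nat → Int
  | none => -1
  | some k => (k : Int)

lemma gbf_lt (amounts : List Int) (maxmium : Int) :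
    ∀ m k, gbf amounts maxmium m = some k → k < m := by
  intro m
  induction m with
  | zero => intro k h; simp [gbf] at h
  | succ m ih =>
    intro k h
    simp only [gbf] at h
    split at h
    · simp only [Option.some.injEq] at h; omega
    · exact Nat.lt_succ_of_lt (ih k h)

lemma zeroTail (d : Nat) : ∀ (xs : List Int) (k : Nat), k + 1 + d ≤ xs.length →
    (PySem.List.pyRange ((k : Int) + d) (k : Int) (-1)).foldl
        (fun acc j => PySem.List.pySetD acc j 0) xs
      = xs.take (k+1) ++ List.replicate d 0 ++ xs.drop (k+1+d) := by
  induction d with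
  | zero =>
    intro xs k h
    rw [PySem.List.pyRange_neg_one_eq_nil (by omega)]
    simp
  | succ d ih =>
    intro xs k h
    have hj : ((k : Int) + ((d:Nat)+1:Nat)) = ((k+d+1 : Nat) : Int) := by push_cast; ring
    rw [hj, PySem.List.pyRange_neg_one_cons (by exact_mod_cast by omega), List.foldl_cons]
    simp only [PySem.List.pySetD_natCast]
    have hstep : ((k+d+1 : Nat) : Int) - 1 = ((k : Int) + d) := by push_cast; ring
    rw [hstep, ih (xs.set (k+d+1) 0) k (by simp; omega)]
    rw [List.take_set_of_le (by omega)]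
    rw [List.set_eq_take_cons_drop 0 (by omega)]
    rw [show k+1+d = k+d+1 from by omega, List.drop_append_of_le_length (by simp; omega)]
    simp [List.replicate_succ']
    omega

lemma take_set_succ (xs : List Int) (k : Nat) (v : Int) (h : k < xs.length) :
    (xs.set k v).take (k+1) = xs.take k ++ [v] := by
  rw [List.set_eq_take_cons_drop v h, List.take_append]
  simp [Nat.min_eq_left (Nat.le_of_lt h)]

lemma attempt_eq (amounts : List Int) (k : Nat) (hk : k < amounts.length) :
    (PySem.List.pyRange ((amounts.length : Int) - 1) (k : Int) (-1)).foldl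
        (fun acc j => PySem.List.pySetD acc j 0)
        (PySem.List.pySetD amounts (k : Int) (PySem.List.pyGetD amounts (k : Int) 0 + 1))
      = build amounts k := by
  simp only [PySem.List.pySetD_natCast, PySem.List.pyGetD_natCast]
  have hd : ((amounts.length : Int) - 1) = (k : Int) + ((amounts.length - 1 - k : Nat) : Int) := by
    omega
  rw [hd, zeroTail _ _ _ (by simp; omega)]
  rw [take_set_succ _ _ _ hk]
  rw [List.drop_eq_nil_of_le (by simp; omega)]
  unfold build
  rw [show amounts.length - 1 - k = amounts.length - k - 1 from by omega]
  simp

lemma build_sum (amounts : List Int) (k : Nat) (hk : k < amounts.length) :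
    (build amounts k).sum = (amounts.take (k+1)).sum + 1 := by
  have h1 : amounts.take (k+1) = amounts.take k ++ [amounts[k]] := by
    rw [List.take_add_one, List.getElem?_eq_getElem hk]; rfl
  have h2 : amounts.getD k 0 = amounts[k] := List.getD_eq_getElem _ _ hk
  rw [build, h1, h2]
  simp only [List.sum_append, List.sum_cons, List.sum_nil, List.sum_replicate, smul_zero]
  ring

lemma Aloop (amounts : List Int) (maxmium : Int) :
    ∀ m, m ≤ amounts.length →
      nextListGo amounts maxmium (PySem.List.pyRange ((m : Int) - 1) (-1) (-1))
        = (match gbf amounts maxmium m with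
           | none => amounts
           | some k => build amounts k) := by
  intro m
  induction m with
  | zero =>
    intro _
    rw [show ((0:Nat):Int) - 1 = -1 by norm_num, PySem.List.pyRange_neg_one_eq_nil (by omega)]
    simp [nextListGo, gbf]
  | succ m ih =>
    intro h
    have hc : ((m+1 : Nat) : Int) - 1 = (m : Int) := by push_cast; ring
    rw [hc, PySem.List.pyRange_neg_one_cons (by omega)]
    simp only [nextListGo]
    rw [attempt_eq amounts m (by omega)]
    have hv : valid (build amounts m) maxmium = decide ((amounts.take (m+1)).sum + 1 ≤ maxmium) := by
      rw [valid, build_sum amounts m (by omega)]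
    rw [hv]
    have hstep : (m : Int) - 1 = ((m : Nat) : Int) - 1 := rfl
    by_cases hcond : (amounts.take (m+1)).sum + 1 ≤ maxmium
    · simp only [gbf, if_pos hcond, decide_eq_true hcond, if_true]
    · simp only [gbf, if_neg hcond, decide_eq_false hcond, Bool.false_eq_true, if_false]
      exact ih (by omega)

lemma altInv (amounts : List Int) (maxmium : Int) :
    ∀ (xs : List Int) (t : Nat), t ≤ amounts.length → amounts.drop t = xs →
      altBest maxmium xs (t : Int) (encode (gbf amounts maxmium t)) ((amounts.take t).sum)
        = encode (gbf amounts maxmium amounts.length) := by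
  intro xs
  induction xs with
  | nil =>
    intro t ht hd
    have : amounts.length - t = 0 := by
      have := congrArg List.length hd; simpa using this
    have ht' : t = amounts.length := by omega
    subst ht'
    simp [altBest]
  | cons x xs ih =>
    intro t ht hd
    have hlen := congrArg List.length hd
    simp only [List.length_drop, List.length_cons] at hlen
    have htlt : t < amounts.length := by omega
    have hx : amounts[t] = x := by
      have h0 : (amounts.drop t)[0]'(by rw [hd]; simp) = x := by
        simp [hd]
      rw [List.getElem_drop] at h0
      simpa using h0
    have hd' : amounts.drop (t+1) = xs := by
      rw [← List.tail_drop, hd, List.tail_cons]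
    have hsum : (amounts.take t).sum + x = (amounts.take (t+1)).sum := by
      rw [List.take_add_one, List.getElem?_eq_getElem htlt]
      simp [hx]
    simp only [altBest]
    have hbest : (if (amounts.take t).sum + x < maxmium then (t : Int)
                  else encode (gbf amounts maxmium t)) = encode (gbf amounts maxmium (t+1)) := by
      rw [hsum]
      simp only [gbf]
      by_cases hc : (amounts.take (t+1)).sum + 1 ≤ maxmium
      · rw [if_pos hc, if_pos (by omega)]; rfl
      · rw [if_neg hc, if_neg (by omega)]
    rw [hbest, hsum, show (t : Int) + 1 = ((t+1 : Nat) : Int) from by push_cast; ring]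
    exact ih (t+1) (by omega) hd'

lemma Balt (amounts : List Int) (maxmium : Int) :
    next_list_alt amounts maxmium
      = (match gbf amounts maxmium amounts.length with
         | none => amounts
         | some k => build amounts k) := by
  have hb : altBest maxmium amounts 0 (-1) 0 = encode (gbf amounts maxmium amounts.length) := by
    have h := altInv amounts maxmium amounts 0 (by omega) (by simp)
    simpa [gbf, encode] using h
  cases hgb : gbf amounts maxmium amounts.length with
  | none => simp [next_list_alt, hb, hgb, encode]
  | some k =>
    have hk : k < amounts.length := gbf_lt amounts maxmium _ _ hgb
    simp only [next_list_alt, hb, hgb, encode]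
    rw [if_neg (by omega)]
    rw [PySem.List.slice_to_natCast]
    simp only [PySem.List.pyGetD_natCast]
    rw [build, List.getD_eq_getElem _ _ hk,
        show (((amounts.length : Int)) - (k : Int) - 1).toNat = amounts.length - k - 1 from by omega]

-- ===== VERDICT (by name: the statement is the Claim_ definition above) =====
theorem next_list_spec : Claim_equal_next_list := by
  intro amounts maxmium _
  unfold Spec_next_list next_list
  rw [Aloop amounts maxmium amounts.length le_rfl, Balt]
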